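-- pv_equiv track=rewrite | github.com/ReneGRomCodes/FCC_daily_coding_challenges | python/04-26/16-04-26 String Math.py | split_s_to_numeric
-- ===== SOURCE A (Python) =====
-- def split_s_to_numeric(s: str) -> list[str]:
--     """Take string 's', splits numeric from non-numeric sections and return them in list of strings.
--     ARGS:
--         s: str
--     RETURN:
--         s_split: list of strings containing distinct numeric and non-numeric sections.
--     """
--     s_split: list[str] = []
--     section: str = ""
--
--     for index, char in enumerate(s):
--         # Find first numeric character and add to 'section'.
--         is_numeric: bool = char.isnumeric()
--
--         if not section:
--             if char.isnumeric():
--                 section += char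
--             else:
--                 continue
--
--         # Split numeric from non-numeric characters by checking if current char is of same type as previous char in
--         # 'section'. Add 'section' to 's_split' if not and start new 'section' variable.
--         else:
--             is_previous_numeric: bool = section[-1].isnumeric()
--
--             if (is_numeric and not is_previous_numeric) or (not is_numeric and is_previous_numeric):
--                 s_split.append(section)
--                 section = char
--             else:
--                 section += char
--
--         # Ensure last section is only added if it is numeric.
--         if index == len(s) - 1 and is_numeric:
--             s_split.append(section)
--
--     return s_split
-- ===== SOURCE B (Python) =====
-- def split_s_to_numeric(s: str) -> list[str]:
--     """Trim leading/trailing non-numeric characters, then group the remaining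
--     core into maximal runs of numeric / non-numeric characters."""
--     lo, hi = 0, len(s)
--     while lo < hi and not s[lo].isnumeric():
--         lo += 1
--     while hi > lo and not s[hi - 1].isnumeric():
--         hi -= 1
--     runs: list[list[str]] = []
--     for ch in s[lo:hi]:
--         if runs and runs[-1][0].isnumeric() == ch.isnumeric():
--             runs[-1].append(ch)
--         else:
--             runs.append([ch])
--     return ["".join(r) for r in runs]
-- ===== Notes on version B (the rewrite author's own statement) =====
-- stated objective: simpler
-- what changed: A's single stateful scan (skip-leading logic, section buffer, flush-on-flip, special last-index append) is replaced by a three-stage pipeline: trim non-numeric characters from both ends, then group the remaining core into maximal runs by a uniform rule with no special cases.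
import Mathlib
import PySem

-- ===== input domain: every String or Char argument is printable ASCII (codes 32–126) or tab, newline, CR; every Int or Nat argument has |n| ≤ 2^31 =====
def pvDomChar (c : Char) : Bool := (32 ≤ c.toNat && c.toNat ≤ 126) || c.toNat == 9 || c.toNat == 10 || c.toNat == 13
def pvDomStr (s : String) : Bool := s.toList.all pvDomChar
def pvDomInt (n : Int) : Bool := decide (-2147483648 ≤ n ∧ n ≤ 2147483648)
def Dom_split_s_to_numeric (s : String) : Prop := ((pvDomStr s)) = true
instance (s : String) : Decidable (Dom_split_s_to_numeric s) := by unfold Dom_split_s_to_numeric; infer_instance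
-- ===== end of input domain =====

-- B replaces A's stateful skip/flush scan by trim-both-ends-then-group (objective: simpler); equal return value proved on Dom.

-- char.isnumeric(): on the printable-ASCII domain this is exactly 'is a decimal digit'
def pvIsNum (c : Char) : Bool := PySem.Chars.isdigit c

-- ===== PORT A =====
-- the for-loop over enumerate(s): acc = s_split, sec = section; 'rest = []' ⟺ 'index == len(s) - 1'
def pvAGo : List Char → List String → List Char → List String
  | [], acc, _sec => acc
  | c :: rest, acc, sec =>
    if sec.isEmpty then
      if pvIsNum c then
        pvAGo rest (if rest.isEmpty then acc ++ [String.ofList [c]] else acc) [c]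
      else
        pvAGo rest acc sec          -- continue
    else
      let isNum := pvIsNum c
      let isPrev := pvIsNum (sec.getLastD ' ')   -- section[-1]; sec is nonempty on this branch
      let p : List String × List Char :=
        if (isNum && !isPrev) || (!isNum && isPrev) then (acc ++ [String.ofList sec], [c])
        else (acc, sec ++ [c])
      pvAGo rest (if rest.isEmpty && isNum then p.1 ++ [String.ofList p.2] else p.1) p.2

def split_s_to_numeric (s : String) : List String := pvAGo s.toList [] []

-- ===== PORT B =====
-- while lo < hi and not s[lo].isnumeric(): lo += 1   (one recursion step per iteration; result = s[lo:len(s)])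
def pvDropLeading : List Char → List Char
  | [] => []
  | c :: cs => if pvIsNum c then c :: cs else pvDropLeading cs

-- while hi > lo and not s[hi - 1].isnumeric(): hi -= 1   (one step per iteration; applied to the suffix, result = s[lo:hi])
def pvDropTrailing (l : List Char) : List Char :=
  if h : l.isEmpty then l
  else if pvIsNum (l.getLast (by simpa [List.isEmpty_iff] using h)) then l
  else pvDropTrailing l.dropLast
termination_by l.length
decreasing_by
  cases l with
  | nil => simp at h
  | cons a as => simp

-- one iteration of the grouping for-loop; runs[-1][0] is runs.getLast?'s head (runs' entries are nonempty)
def pvStep (runs : List (List Char)) (ch : Char) : List (List Char) :=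
  match runs.getLast? with
  | some r => if pvIsNum (r.headD ' ') == pvIsNum ch then runs.dropLast ++ [r ++ [ch]] else runs ++ [[ch]]
  | none => runs ++ [[ch]]

def split_s_to_numeric_alt (s : String) : List String :=
  (((pvDropTrailing (pvDropLeading s.toList)).foldl pvStep []).map (fun r => String.ofList r))

-- ===== PRECONDITION & SPEC =====
def Spec_split_s_to_numeric (s : String) (out : List String) : Prop := out = split_s_to_numeric_alt s
instance (s : String) (out : List String) : Decidable (Spec_split_s_to_numeric s out) := by unfold Spec_split_s_to_numeric; infer_instance

-- ===== CLAIM (what is proved, stated in full; the proofs are below) =====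
def Claim_equal_split_s_to_numeric : Prop := ∀ (s : String), Dom_split_s_to_numeric s → Spec_split_s_to_numeric s (split_s_to_numeric s)

-- ===== LEMMAS AND PROOFS =====

theorem pv_mem_getLastD (l : List Char) (d : Char) (h : l ≠ []) : l.getLastD d ∈ l := by
  induction l generalizing d with
  | nil => exact absurd rfl h
  | cons c cs ih =>
    cases cs with
    | nil => simp
    | cons c' cs' => simpa using Or.inr (ih c (by simp))

-- pvDropTrailing: back-to-front equation and its consequences
theorem pv_te_nil : pvDropTrailing [] = [] := by rw [pvDropTrailing]; simp

theorem pv_te_concat (a : List Char) (c : Char) :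
    pvDropTrailing (a ++ [c]) = if pvIsNum c then a ++ [c] else pvDropTrailing a := by
  rw [pvDropTrailing]
  simp

theorem pv_te_nil_iff (l : List Char) : pvDropTrailing l = [] ↔ ∀ c ∈ l, pvIsNum c = false := by
  induction l using List.reverseRecOn with
  | nil => simp [pv_te_nil]
  | append_singleton a c ih =>
    rw [pv_te_concat]
    by_cases hc : pvIsNum c
    · simp only [hc, if_pos]
      constructor
      · intro h; exact absurd h (by simp)
      · intro h; exact absurd (h c (by simp)) (by simp [hc])
    · simp only [hc, if_neg, Bool.not_eq_true]
      rw [ih]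
      constructor
      · intro h x hx
        rcases List.mem_append.1 hx with h1 | h1
        · exact h x h1
        · simp at h1; subst h1; simpa using hc
      · intro h x hx; exact h x (List.mem_append.2 (Or.inl hx))

theorem pv_te_append_all_false (a b : List Char) (hb : ∀ c ∈ b, pvIsNum c = false) :
    pvDropTrailing (a ++ b) = pvDropTrailing a := by
  induction b using List.reverseRecOn with
  | nil => simp
  | append_singleton b' c ih =>
    have hc : pvIsNum c = false := hb c (by simp)
    rw [← List.append_assoc, pv_te_concat, hc]
    simp only [if_false, Bool.false_eq_true]
    exact ih (fun x hx => hb x (List.mem_append.2 (Or.inl hx)))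

theorem pv_te_append (a b : List Char) (hb : pvDropTrailing b ≠ []) :
    pvDropTrailing (a ++ b) = a ++ pvDropTrailing b := by
  induction b using List.reverseRecOn with
  | nil => simp [pv_te_nil] at hb
  | append_singleton b' c ih =>
    rw [← List.append_assoc, pv_te_concat, pv_te_concat] at *
    by_cases hc : pvIsNum c
    · simp [hc]
    · simp only [hc, Bool.false_eq_true, if_false] at *
      exact ih hb

theorem pv_te_prefix (l : List Char) : pvDropTrailing l <+: l := by
  induction l using List.reverseRecOn with
  | nil => simp [pv_te_nil]
  | append_singleton a c ih =>
    rw [pv_te_concat]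
    by_cases hc : pvIsNum c
    · simp [hc]
    · simp only [hc, Bool.false_eq_true, if_false]
      exact ih.trans (List.prefix_append a [c])

theorem pv_te_head (c : Char) (rest : List Char) (h : pvDropTrailing (c :: rest) ≠ []) :
    ∃ t, pvDropTrailing (c :: rest) = c :: t := by
  obtain ⟨t, ht⟩ := pv_te_prefix (c :: rest)
  cases hy : pvDropTrailing (c :: rest) with
  | nil => exact absurd hy h
  | cons a t' =>
    rw [hy] at ht
    have hac : a = c := by
      have := ht
      simp [List.cons_append] at this
      exact this.1
    exact ⟨t', by rw [hac]⟩

theorem pv_te_cons_true_ne (c : Char) (rest : List Char) (hc : pvIsNum c = true) :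
    pvDropTrailing (c :: rest) ≠ [] := by
  intro h
  have := (pv_te_nil_iff (c :: rest)).1 h c (by simp)
  rw [hc] at this; exact absurd this (by simp)

-- pvStep / foldl pvStep: prefix invariance and uniform runs
theorem pv_step_ne_nil (acc : List (List Char)) (ch : Char) : pvStep acc ch ≠ [] := by
  unfold pvStep
  cases h : acc.getLast? with
  | none => simp
  | some r => dsimp; split <;> simp

theorem pv_step_prefix (rs acc : List (List Char)) (ch : Char) (h : acc ≠ []) :
    pvStep (rs ++ acc) ch = rs ++ pvStep acc ch := by
  unfold pvStep
  rw [List.getLast?_append_of_ne_nil rs h, List.dropLast_append_of_ne_nil h]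
  cases acc.getLast? with
  | none => simp
  | some r => dsimp; split <;> simp

theorem pv_foldl_prefix (y : List Char) (rs acc : List (List Char)) (h : acc ≠ []) :
    List.foldl pvStep (rs ++ acc) y = rs ++ List.foldl pvStep acc y := by
  induction y generalizing acc with
  | nil => simp
  | cons ch y ih =>
    simp only [List.foldl_cons]
    rw [pv_step_prefix rs acc ch h, ih _ (pv_step_ne_nil acc ch)]

theorem pv_foldl_run (tail : List Char) (r : List Char) (k : Bool) (hr : r ≠ [])
    (hh : pvIsNum (r.headD ' ') = k) (ht : ∀ c ∈ tail, pvIsNum c = k) :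
    List.foldl pvStep [r] tail = [r ++ tail] := by
  induction tail generalizing r with
  | nil => simp
  | cons c cs ih =>
    have hc : pvIsNum c = k := ht c (by simp)
    have hh2 : pvIsNum (r.head?.getD ' ') = k := by simpa using hh
    have hstep : pvStep [r] c = [r ++ [c]] := by
      unfold pvStep
      simp [hh2, hc]
    simp only [List.foldl_cons, hstep]
    have hh' : pvIsNum ((r ++ [c]).headD ' ') = k := by
      cases r with
      | nil => exact absurd rfl hr
      | cons a as => simpa using hh
    rw [ih (r ++ [c]) (by simp) hh' (fun x hx => ht x (by simp [hx]))]
    simp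

theorem pv_g_uniform (sec : List Char) (k : Bool) (hne : sec ≠ [])
    (hu : ∀ c ∈ sec, pvIsNum c = k) : List.foldl pvStep [] sec = [sec] := by
  cases sec with
  | nil => exact absurd rfl hne
  | cons c cs =>
    have h0 : pvStep [] c = [[c]] := by unfold pvStep; simp
    simp only [List.foldl_cons, h0]
    exact pv_foldl_run cs [c] k (by simp) (by simpa using hu c (by simp))
      (fun x hx => hu x (by simp [hx]))

theorem pv_g_flip (sec : List Char) (k : Bool) (c : Char) (y : List Char) (hne : sec ≠ [])
    (hu : ∀ x ∈ sec, pvIsNum x = k) (hc : pvIsNum c = !k) :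
    List.foldl pvStep [] (sec ++ c :: y) = sec :: List.foldl pvStep [] (c :: y) := by
  rw [List.foldl_append, pv_g_uniform sec k hne hu]
  have hhead : pvIsNum (sec.headD ' ') = k := by
    cases sec with
    | nil => exact absurd rfl hne
    | cons a as => simpa using hu a (by simp)
  have hhead2 : pvIsNum (sec.head?.getD ' ') = k := by simpa using hhead
  have hstep : pvStep [sec] c = [sec, [c]] := by
    unfold pvStep
    simp [hhead2, hc]
  have h0 : pvStep [] c = [[c]] := by unfold pvStep; simp
  simp only [List.foldl_cons, hstep, h0]
  have : ([sec, [c]] : List (List Char)) = [sec] ++ [[c]] := by simp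
  rw [this, pv_foldl_prefix y [sec] [[c]] (by simp)]
  simp

-- the main loop invariant: with a nonempty uniform section and input left to read,
-- A's loop produces exactly acc ++ B's grouping of the end-trimmed remainder
theorem pv_invariant (cs : List Char) (hcs : cs ≠ []) (acc : List String) (sec : List Char)
    (k : Bool) (hne : sec ≠ []) (hu : ∀ x ∈ sec, pvIsNum x = k) :
    pvAGo cs acc sec =
      acc ++ ((pvDropTrailing (sec ++ cs)).foldl pvStep []).map (fun r => String.ofList r) := by
  induction cs generalizing acc sec k with
  | nil => exact absurd rfl hcs
  | cons c rest ih =>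
    have hprev2 : pvIsNum (sec.getLast?.getD ' ') = k := by
      simpa using hu _ (pv_mem_getLastD sec ' ' hne)
    have hsec : sec.isEmpty = false := by simpa [List.isEmpty_iff] using hne
    by_cases hck : pvIsNum c = k
    · -- same class: extend the section
      have huc : ∀ x ∈ sec ++ [c], pvIsNum x = k := by
        intro x hx
        rcases List.mem_append.1 hx with h | h
        · exact hu x h
        · simp at h; subst h; exact hck
      cases k with
      | true =>
        have hA : pvAGo (c :: rest) acc sec =
            pvAGo rest (if rest.isEmpty then acc ++ [String.ofList (sec ++ [c])] else acc)
              (sec ++ [c]) := by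
          rw [pvAGo]; simp [hsec, hprev2, hck]
        cases rest with
        | nil =>
          rw [hA, pvAGo]
          have hten : pvDropTrailing (sec ++ [c]) = sec ++ [c] := by
            rw [pv_te_concat]; simp [hck]
          rw [hten, pv_g_uniform (sec ++ [c]) true (by simp) huc]
          simp
        | cons c' rest' =>
          rw [hA]
          simp only [List.isEmpty_cons, Bool.false_eq_true, if_false]
          rw [ih (by simp) acc (sec ++ [c]) true (by simp) huc]
          simp
      | false =>
        have hA : pvAGo (c :: rest) acc sec = pvAGo rest acc (sec ++ [c]) := by
          rw [pvAGo]; simp [hsec, hprev2, hck]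
        cases rest with
        | nil =>
          rw [hA, pvAGo]
          have hten : pvDropTrailing (sec ++ [c]) = [] := by
            rw [pv_te_nil_iff]
            intro x hx; exact huc x hx
          rw [hten]
          simp
        | cons c' rest' =>
          rw [hA, ih (by simp) acc (sec ++ [c]) false (by simp) huc]
          simp
    · -- class flip: flush the section, start a new one from c
      have hc' : pvIsNum c = !k := by cases k <;> simp_all
      cases k with
      | true =>
        have hc0 : pvIsNum c = false := by simpa using hc'
        have hA : pvAGo (c :: rest) acc sec = pvAGo rest (acc ++ [String.ofList sec]) [c] := by
          rw [pvAGo]; simp [hsec, hprev2, hc0]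
        have hsec_te : pvDropTrailing sec = sec := by
          have hrw : sec.dropLast ++ [sec.getLast hne] = sec := List.dropLast_concat_getLast hne
          rw [← hrw, pv_te_concat]
          simp [hu _ (List.getLast_mem hne)]
        cases rest with
        | nil =>
          rw [hA, pvAGo]
          have hten : pvDropTrailing (sec ++ [c]) = sec := by
            rw [pv_te_concat, hc0]
            simpa using hsec_te
          rw [hten, pv_g_uniform sec true hne hu]
          simp
        | cons c' rest' =>
          rw [hA, ih (by simp) (acc ++ [String.ofList sec]) [c] false (by simp)
            (by intro x hx; simp at hx; subst hx; exact hc0)]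
          by_cases hy : pvDropTrailing (c :: c' :: rest') = []
          · have hall := (pv_te_nil_iff _).1 hy
            have hten : pvDropTrailing (sec ++ c :: c' :: rest') = sec := by
              rw [pv_te_append_all_false sec _ hall]; exact hsec_te
            simp only [List.singleton_append]
            rw [hy, hten, pv_g_uniform sec true hne hu]
            simp
          · obtain ⟨t, ht⟩ := pv_te_head c (c' :: rest') hy
            have hten : pvDropTrailing (sec ++ c :: c' :: rest') = sec ++ (c :: t) := by
              rw [pv_te_append sec _ hy, ht]
            simp only [List.singleton_append]
            rw [hten, ht, pv_g_flip sec true c t hne hu (by simpa using hc0)]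
            simp
      | false =>
        have hc1 : pvIsNum c = true := by simpa using hc'
        have hA : pvAGo (c :: rest) acc sec =
            pvAGo rest (if rest.isEmpty then (acc ++ [String.ofList sec]) ++ [String.ofList [c]]
              else acc ++ [String.ofList sec]) [c] := by
          rw [pvAGo]; simp [hsec, hprev2, hc1]
        cases rest with
        | nil =>
          rw [hA, pvAGo]
          have hten : pvDropTrailing (sec ++ [c]) = sec ++ [c] := by
            rw [pv_te_concat]; simp [hc1]
          rw [hten, pv_g_flip sec false c [] hne hu (by simpa using hc1)]
          have h0 : pvStep [] c = [[c]] := by unfold pvStep; simp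
          simp [h0]
        | cons c' rest' =>
          rw [hA]
          simp only [List.isEmpty_cons, Bool.false_eq_true, if_false]
          rw [ih (by simp) (acc ++ [String.ofList sec]) [c] true (by simp)
            (by intro x hx; simp at hx; subst hx; exact hc1)]
          have hy : pvDropTrailing (c :: c' :: rest') ≠ [] := pv_te_cons_true_ne c _ hc1
          obtain ⟨t, ht⟩ := pv_te_head c _ hy
          have hten : pvDropTrailing (sec ++ c :: c' :: rest') = sec ++ (c :: t) := by
            rw [pv_te_append sec _ hy, ht]
          simp only [List.singleton_append]
          rw [hten, ht, pv_g_flip sec false c t hne hu (by simpa using hc1)]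
          simp

-- skipping the leading non-numeric prefix, then the invariant
theorem pv_main (l : List Char) :
    pvAGo l [] [] =
      ((pvDropTrailing (pvDropLeading l)).foldl pvStep []).map (fun r => String.ofList r) := by
  induction l with
  | nil => simp [pvAGo, pvDropLeading, pv_te_nil]
  | cons c cs ih =>
    by_cases hc : pvIsNum c
    · rw [pvDropLeading]
      simp only [hc, if_pos]
      cases cs with
      | nil =>
        rw [pvAGo]
        simp only [List.isEmpty_nil, if_pos, hc]
        rw [pvAGo]
        have hten : pvDropTrailing [c] = [c] := by
          have : ([c] : List Char) = [] ++ [c] := by simp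
          rw [this, pv_te_concat]; simp [hc]
        rw [hten]
        have h0 : pvStep [] c = [[c]] := by unfold pvStep; simp
        simp [h0]
      | cons c' cs' =>
        rw [pvAGo]
        simp only [List.isEmpty_nil, if_pos, hc, List.isEmpty_cons, Bool.false_eq_true,
          if_false]
        have := pv_invariant (c' :: cs') (by simp) [] [c] (pvIsNum c) (by simp)
          (by intro x hx; simp at hx; subst hx; rfl)
        simpa using this
    · rw [pvAGo, pvDropLeading]
      simp only [hc, List.isEmpty_nil, if_pos, Bool.false_eq_true, if_false]
      exact ih

-- ===== VERDICT (by name: the statement is the Claim_ definition above) =====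
theorem split_s_to_numeric_spec : Claim_equal_split_s_to_numeric := by
  intro s _
  show split_s_to_numeric s = split_s_to_numeric_alt s
  unfold split_s_to_numeric split_s_to_numeric_alt
  exact pv_main s.toList
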